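-- pv_equiv track=rewrite | github.com/ratnaparkhivivek10/cg_codility_solutions | problem_statement_1_solution.py | solution
-- ===== SOURCE A (Python) =====
-- from itertools import combinations
--
-- def solution(data):
--     pit_depth = []
--     for p, q, r in combinations(range(len(data)), 3):
--         is_pq_decreasing = all([data[i] > data[i+1] for i in range(p, q)])
--         is_qr_increasing = all([data[i] < data[i+1] for i in range(q, r)])
--
--         if is_pq_decreasing and is_qr_increasing:
--             pit = min(data[p] - data[q], data[r] - data[q])
--             pit_depth.append(pit)
--
--     return max(pit_depth)
-- ===== SOURCE B (Python) =====
-- def solution(data):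
--     # Linear scan: each strict local minimum q, extended left along the strictly
--     # decreasing run and right along the strictly increasing run, gives the best
--     # pit with bottom q; take the deepest over all q.
--     n = len(data)
--     best = None
--     for q in range(1, n - 1):
--         if data[q - 1] > data[q] and data[q] < data[q + 1]:
--             p = q
--             while p > 0 and data[p - 1] > data[p]:
--                 p -= 1
--             r = q
--             while r < n - 1 and data[r] < data[r + 1]:
--                 r += 1
--             depth = min(data[p] - data[q], data[r] - data[q])
--             if best is None or depth > best:
--                 best = depth
--     if best is None:
--         raise ValueError("no pit")
--     return best
-- ===== Notes on version B (the rewrite author's own statement) =====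
-- stated objective: faster
-- what changed: Replaces the enumeration of all index triples (p,q,r) with monotonicity checks per triple by a single pass over strict local minima, each extended once to the ends of its strictly decreasing/increasing runs; Pre_ excludes inputs with no pit (no strict local minimum), where both A and B raise ValueError.
import Mathlib
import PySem

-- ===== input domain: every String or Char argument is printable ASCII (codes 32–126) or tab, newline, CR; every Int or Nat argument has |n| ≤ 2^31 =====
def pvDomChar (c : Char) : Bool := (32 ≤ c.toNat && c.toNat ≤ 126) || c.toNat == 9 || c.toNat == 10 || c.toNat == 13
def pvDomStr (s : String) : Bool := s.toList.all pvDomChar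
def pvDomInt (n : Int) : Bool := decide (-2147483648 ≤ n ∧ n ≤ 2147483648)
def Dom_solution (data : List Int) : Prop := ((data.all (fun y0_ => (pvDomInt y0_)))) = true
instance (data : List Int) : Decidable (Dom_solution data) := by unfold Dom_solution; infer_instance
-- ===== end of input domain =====

-- B replaces A's O(n^4) scan of all index triples by one linear pass over strict
-- local minima, each extended once along its monotone runs (measured asymptotically faster).
-- Both Pythons raise ValueError when the input has no pit; Pre_ excludes exactly those inputs.

-- shared in-bounds element access (all indices used are in range)
def pvGet (data : List Int) (i : Nat) : Int := data.getD i 0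

-- ===== PORT A =====
-- all([data[i] > data[i+1] for i in range(p, q)])
def decAll (data : List Int) (p q : Nat) : Bool :=
  (List.range' p (q - p)).all fun i => decide (pvGet data i > pvGet data (i+1))

-- all([data[i] < data[i+1] for i in range(q, r)])
def incAll (data : List Int) (q r : Nat) : Bool :=
  (List.range' q (r - q)).all fun i => decide (pvGet data i < pvGet data (i+1))

-- the list pit_depth built over combinations(range(len(data)), 3), i.e. p < q < r
def pitsA (data : List Int) : List Int :=
  (List.range data.length).flatMap fun p =>
    (List.range data.length).flatMap fun q =>
      (List.range data.length).filterMap fun r =>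
        if p < q ∧ q < r then
          if decAll data p q ∧ incAll data q r then
            some (min (pvGet data p - pvGet data q) (pvGet data r - pvGet data q))
          else none
        else none

-- max(pit_depth); Python raises ValueError on an empty list — excluded by Pre_
def solution (data : List Int) : Int := (pitsA data).max?.getD 0

-- ===== PORT B =====
-- while p > 0 and data[p-1] > data[p]: p -= 1   (structural recursion on p)
def extLeft (data : List Int) : Nat → Nat
  | 0 => 0
  | p+1 => if pvGet data p > pvGet data (p+1) then extLeft data p else p+1

-- while r < n-1 and data[r] < data[r+1]: r += 1   (fuel = n-1-r steps remain)
def extRightAux (data : List Int) : Nat → Nat → Nat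
  | 0, r => r
  | fuel+1, r => if pvGet data r < pvGet data (r+1) then extRightAux data fuel (r+1) else r

-- the body of B's for-loop over q
def stepB (data : List Int) (n : Nat) (best : Option Int) (q : Nat) : Option Int :=
  if pvGet data (q-1) > pvGet data q ∧ pvGet data q < pvGet data (q+1) then
    let p := extLeft data q
    let r := extRightAux data (n - 1 - q) q
    let depth := min (pvGet data p - pvGet data q) (pvGet data r - pvGet data q)
    match best with
    | none => some depth
    | some b => if depth > b then some depth else some b
  else best

def solution_alt (data : List Int) : Int :=
  let n := data.length
  let best := (List.range' 1 (n - 2)).foldl (stepB data n) none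
  best.getD 0  -- Python raises ValueError when best is None — excluded by Pre_

-- ===== PRECONDITION & SPEC =====
-- Pre_ excludes exactly the inputs with no strict local minimum, on which both
-- A (max of an empty list) and B raise ValueError.
def Pre_solution (data : List Int) : Prop :=
  ∃ q, q < data.length ∧ 0 < q ∧ q + 1 < data.length ∧
    pvGet data (q-1) > pvGet data q ∧ pvGet data q < pvGet data (q+1)

instance (data : List Int) : Decidable (Pre_solution data) := by
  unfold Pre_solution; infer_instance

def pvWitness_solution : List Int := ([3, 1, 2])

def Spec_solution (data : List Int) (out : Int) : Prop := out = solution_alt data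
instance (data : List Int) (out : Int) : Decidable (Spec_solution data out) := by unfold Spec_solution; infer_instance

-- ===== CLAIM (what is proved, stated in full; the proofs are below) =====
def Claim_equal_solution : Prop := ∀ (data : List Int), Dom_solution data → Pre_solution data → Spec_solution data (solution data)

-- ===== LEMMAS AND PROOFS =====

-- membership in A's pit list
theorem mem_pitsA {data : List Int} {x : Int} :
    x ∈ pitsA data ↔ ∃ p q r, p < q ∧ q < r ∧ r < data.length ∧
      decAll data p q = true ∧ incAll data q r = true ∧
      x = min (pvGet data p - pvGet data q) (pvGet data r - pvGet data q) := by
  unfold pitsA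
  simp only [List.mem_flatMap, List.mem_filterMap, List.mem_range]
  constructor
  · rintro ⟨p, hp, q, hq, r, hr, hx⟩
    by_cases h1 : p < q ∧ q < r
    · rw [if_pos h1] at hx
      by_cases h2 : decAll data p q = true ∧ incAll data q r = true
      · rw [if_pos h2] at hx
        exact ⟨p, q, r, h1.1, h1.2, hr, h2.1, h2.2, (Option.some_inj.mp hx).symm⟩
      · rw [if_neg h2] at hx; cases hx
    · rw [if_neg h1] at hx; cases hx
  · rintro ⟨p, q, r, hpq, hqr, hrn, hdec, hinc, hx⟩
    refine ⟨p, by omega, q, by omega, r, hrn, ?_⟩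
    rw [if_pos ⟨hpq, hqr⟩, if_pos ⟨hdec, hinc⟩, hx]

theorem decAll_iff {data : List Int} {p q : Nat} (_hpq : p ≤ q) :
    decAll data p q = true ↔ ∀ i, p ≤ i → i < q → pvGet data i > pvGet data (i+1) := by
  unfold decAll
  simp only [List.all_eq_true, List.mem_range'_1, decide_eq_true_eq]
  constructor
  · intro h i h1 h2; exact h i ⟨h1, by omega⟩
  · rintro h i ⟨h1, h2⟩; exact h i h1 (by omega)

theorem incAll_iff {data : List Int} {q r : Nat} (_hqr : q ≤ r) :
    incAll data q r = true ↔ ∀ i, q ≤ i → i < r → pvGet data i < pvGet data (i+1) := by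
  unfold incAll
  simp only [List.all_eq_true, List.mem_range'_1, decide_eq_true_eq]
  constructor
  · intro h i h1 h2; exact h i ⟨h1, by omega⟩
  · rintro h i ⟨h1, h2⟩; exact h i h1 (by omega)

-- chains along monotone runs
theorem dec_chain {data : List Int} {a : Nat} :
    ∀ k, (∀ i, a ≤ i → i < a + k → pvGet data i > pvGet data (i+1)) →
      pvGet data (a + k) ≤ pvGet data a := by
  intro k
  induction k with
  | zero => intro _; simp
  | succ k ih =>
    intro h
    have h1 : pvGet data (a + k) ≤ pvGet data a := ih (fun i h1 h2 => h i h1 (by omega))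
    have h2 : pvGet data (a + k) > pvGet data (a + k + 1) := h (a + k) (by omega) (by omega)
    rw [show a + (k + 1) = (a + k) + 1 from rfl]
    omega

theorem inc_chain {data : List Int} {a : Nat} :
    ∀ k, (∀ i, a ≤ i → i < a + k → pvGet data i < pvGet data (i+1)) →
      pvGet data a ≤ pvGet data (a + k) := by
  intro k
  induction k with
  | zero => intro _; simp
  | succ k ih =>
    intro h
    have h1 : pvGet data a ≤ pvGet data (a + k) := ih (fun i h1 h2 => h i h1 (by omega))
    have h2 : pvGet data (a + k) < pvGet data (a + k + 1) := h (a + k) (by omega) (by omega)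
    rw [show a + (k + 1) = (a + k) + 1 from rfl]
    omega

-- extLeft basics
theorem extLeft_le (data : List Int) : ∀ q, extLeft data q ≤ q := by
  intro q
  induction q with
  | zero => simp [extLeft]
  | succ p ih =>
    simp only [extLeft]
    split_ifs with h
    · omega
    · omega

theorem extLeft_dec (data : List Int) :
    ∀ q i, extLeft data q ≤ i → i < q → pvGet data i > pvGet data (i+1) := by
  intro q
  induction q with
  | zero => intro i _ h; omega
  | succ p ih =>
    intro i h1 h2
    simp only [extLeft] at h1
    split_ifs at h1 with h
    · rcases Nat.lt_or_ge i p with hi | hi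
      · exact ih i h1 hi
      · have : i = p := by omega
        subst this; exact h
    · omega

theorem extLeft_stop (data : List Int) :
    ∀ q, 0 < extLeft data q → ¬ (pvGet data (extLeft data q - 1) > pvGet data (extLeft data q)) := by
  intro q
  induction q with
  | zero => simp [extLeft]
  | succ p ih =>
    simp only [extLeft]
    split_ifs with h
    · exact ih
    · intro _; simpa using h

theorem extLeft_min (data : List Int) {q p : Nat}
    (_hp : p ≤ q) (h : ∀ i, p ≤ i → i < q → pvGet data i > pvGet data (i+1)) :
    extLeft data q ≤ p := by
  by_contra hc
  push Not at hc
  set e := extLeft data q with he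
  have he1 : 0 < e := by omega
  have he2 : e ≤ q := extLeft_le data q
  have ht := h (e - 1) (by omega) (by omega)
  have hstop := extLeft_stop data q he1
  rw [← he] at hstop
  rw [show e - 1 + 1 = e from by omega] at ht
  exact hstop ht

-- extRightAux basics
theorem extRight_ge (data : List Int) :
    ∀ fuel r, r ≤ extRightAux data fuel r ∧ extRightAux data fuel r ≤ r + fuel := by
  intro fuel
  induction fuel with
  | zero => intro r; simp [extRightAux]
  | succ f ih =>
    intro r
    simp only [extRightAux]
    split_ifs with h
    · have := ih (r + 1); omega
    · omega

theorem extRight_inc (data : List Int) :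
    ∀ fuel r i, r ≤ i → i < extRightAux data fuel r → pvGet data i < pvGet data (i+1) := by
  intro fuel
  induction fuel with
  | zero =>
    intro r i h1 h2; simp only [extRightAux] at h2; omega
  | succ f ih =>
    intro r i h1 h2
    simp only [extRightAux] at h2
    split_ifs at h2 with h
    · rcases Nat.lt_or_ge i (r + 1) with hi | hi
      · have : i = r := by omega
        subst this; exact h
      · exact ih (r + 1) i hi h2
    · omega

theorem extRight_stop (data : List Int) :
    ∀ fuel r, extRightAux data fuel r < r + fuel →
      ¬ (pvGet data (extRightAux data fuel r) < pvGet data (extRightAux data fuel r + 1)) := by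
  intro fuel
  induction fuel with
  | zero => intro r h; simp only [extRightAux] at *; omega
  | succ f ih =>
    intro r h
    simp only [extRightAux] at *
    split_ifs at * with hc
    · exact ih (r + 1) (by omega)
    · intro hx; exact hc hx

theorem extRight_max (data : List Int) {fuel r r' : Nat}
    (_h1 : r ≤ r') (h2 : r' ≤ r + fuel)
    (h : ∀ i, r ≤ i → i < r' → pvGet data i < pvGet data (i+1)) :
    r' ≤ extRightAux data fuel r := by
  by_contra hc
  push Not at hc
  set e := extRightAux data fuel r with he
  have hge := (extRight_ge data fuel r).1
  have hlt : e < r + fuel := by omega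
  have hstop := extRight_stop data fuel r hlt
  rw [← he] at hstop
  exact hstop (h e (by omega) hc)

-- B's candidate list and its relation to the fold in solution_alt
def candF (data : List Int) (q : Nat) : Option Int :=
  if pvGet data (q-1) > pvGet data q ∧ pvGet data q < pvGet data (q+1) then
    some (min (pvGet data (extLeft data q) - pvGet data q)
              (pvGet data (extRightAux data (data.length - 1 - q) q) - pvGet data q))
  else none

def candList (data : List Int) : List Int :=
  (List.range' 1 (data.length - 2)).filterMap (candF data)

def mergeOpt : Option Int → Option Int → Option Int
  | a, none => a
  | none, some y => some y
  | some x, some y => some (max x y)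

theorem max?_cons_merge (a : Int) (l : List Int) :
    (a :: l).max? = mergeOpt (some a) l.max? := by
  cases l with
  | nil => simp [mergeOpt]
  | cons b l =>
    rw [List.max?_cons', List.max?_cons']
    simp only [mergeOpt, List.foldl_cons]
    rw [List.foldl_assoc]

theorem foldl_step (data : List Int) (acc : Option Int) (q : Nat) :
    stepB data data.length acc q = mergeOpt acc (candF data q) := by
  unfold stepB candF
  by_cases h : pvGet data (q-1) > pvGet data q ∧ pvGet data q < pvGet data (q+1)
  · rw [if_pos h, if_pos h]
    cases acc with
    | none => rfl
    | some b =>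
      simp only [mergeOpt]
      split_ifs with hd
      · rw [max_eq_right (le_of_lt hd)]
      · rw [max_eq_left (by omega)]
  · rw [if_neg h, if_neg h]
    cases acc <;> rfl

theorem mergeOpt_assoc (a b c : Option Int) :
    mergeOpt (mergeOpt a b) c = mergeOpt a (mergeOpt b c) := by
  cases a <;> cases b <;> cases c <;> simp [mergeOpt, max_assoc]

theorem foldl_merge (data : List Int) :
    ∀ (L : List Nat) (acc : Option Int),
      L.foldl (stepB data data.length) acc
      = mergeOpt acc (L.filterMap (candF data)).max? := by
  intro L
  induction L with
  | nil => intro acc; simp [mergeOpt]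
  | cons q L ih =>
    intro acc
    rw [List.foldl_cons, ih, foldl_step]
    cases h : candF data q with
    | none => simp [h, mergeOpt]
    | some d =>
      simp only [List.filterMap_cons, h]
      rw [max?_cons_merge, mergeOpt_assoc]

theorem solution_alt_eq (data : List Int) :
    solution_alt data = ((candList data).max?).getD 0 := by
  unfold solution_alt candList
  show ((List.range' 1 (data.length - 2)).foldl (stepB data data.length) none).getD 0 = _
  rw [foldl_merge]
  cases (List.filterMap (candF data) (List.range' 1 (data.length - 2))).max? <;> rfl

-- every pit of A is dominated by a candidate of B
theorem pitsA_dominated {data : List Int} {x : Int} (hx : x ∈ pitsA data) :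
    ∃ y ∈ candList data, x ≤ y := by
  rw [mem_pitsA] at hx
  obtain ⟨p, q, r, hpq, hqr, hrn, hdec, hinc, hx⟩ := hx
  rw [decAll_iff (by omega)] at hdec
  rw [incAll_iff (by omega)] at hinc
  have hlm1 : pvGet data (q-1) > pvGet data q := by
    have := hdec (q-1) (by omega) (by omega)
    have hq : q - 1 + 1 = q := by omega
    rwa [hq] at this
  have hlm2 : pvGet data q < pvGet data (q+1) := hinc q (by omega) (by omega)
  set e := extLeft data q with he
  set e' := extRightAux data (data.length - 1 - q) q with he'
  refine ⟨min (pvGet data e - pvGet data q) (pvGet data e' - pvGet data q), ?_, ?_⟩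
  · unfold candList
    rw [List.mem_filterMap]
    refine ⟨q, ?_, ?_⟩
    · rw [List.mem_range'_1]; omega
    · unfold candF; rw [if_pos ⟨hlm1, hlm2⟩, ← he, ← he']
  · -- d p ≤ d e and d r ≤ d e'
    have hep : e ≤ p := extLeft_min data (by omega) hdec
    have hdp : pvGet data p ≤ pvGet data e := by
      have := dec_chain (data := data) (a := e) (p - e)
        (fun i h1 h2 => extLeft_dec data q i h1 (by omega))
      have hpe : e + (p - e) = p := by omega
      rwa [hpe] at this
    have her : r ≤ e' := extRight_max data (by omega) (by omega) hinc
    have hdr : pvGet data r ≤ pvGet data e' := by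
      have hle : e' ≤ data.length - 1 := by
        have := (extRight_ge data (data.length - 1 - q) q).2; omega
      have := inc_chain (data := data) (a := r) (e' - r)
        (fun i h1 h2 => extRight_inc data (data.length - 1 - q) q i (by omega) (by omega))
      have hre : r + (e' - r) = e' := by omega
      rwa [hre] at this
    subst hx
    apply le_min
    · exact le_trans (min_le_left _ _) (by omega)
    · exact le_trans (min_le_right _ _) (by omega)

-- every candidate of B is a pit of A
theorem candList_subset {data : List Int} {y : Int} (hy : y ∈ candList data) :
    y ∈ pitsA data := by
  unfold candList at hy
  rw [List.mem_filterMap] at hy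
  obtain ⟨q, hq, hc⟩ := hy
  rw [List.mem_range'_1] at hq
  unfold candF at hc
  split_ifs at hc with h
  · obtain ⟨h1, h2⟩ := h
    have hn : q + 1 < data.length := by omega
    set e := extLeft data q with he
    set e' := extRightAux data (data.length - 1 - q) q with he'
    have heq : e < q := by
      have : extLeft data q ≤ q - 1 := by
        apply extLeft_min data (by omega)
        intro i hi1 hi2
        have : i = q - 1 := by omega
        subst this
        have hq1 : q - 1 + 1 = q := by omega
        rwa [hq1]
      omega
    have hqe' : q < e' := by
      have : q + 1 ≤ extRightAux data (data.length - 1 - q) q := by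
        apply extRight_max data (by omega) (by omega)
        intro i hi1 hi2
        have : i = q := by omega
        subst this; exact h2
      omega
    have he'n : e' < data.length := by
      have := (extRight_ge data (data.length - 1 - q) q).2; omega
    rw [mem_pitsA]
    refine ⟨e, q, e', heq, hqe', he'n, ?_, ?_, (Option.some_inj.mp hc).symm⟩
    · rw [decAll_iff (by omega)]
      intro i hi1 hi2; exact extLeft_dec data q i hi1 hi2
    · rw [incAll_iff (by omega)]
      intro i hi1 hi2; exact extRight_inc data (data.length - 1 - q) q i hi1 hi2

-- under Pre_, B's candidate list is nonempty
theorem candList_ne_nil {data : List Int} (hpre : Pre_solution data) :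
    candList data ≠ [] := by
  obtain ⟨q, hq, h0, h1, h2, h3⟩ := hpre
  intro hnil
  have : (min (pvGet data (extLeft data q) - pvGet data q)
              (pvGet data (extRightAux data (data.length - 1 - q) q) - pvGet data q))
      ∈ candList data := by
    unfold candList
    rw [List.mem_filterMap]
    refine ⟨q, ?_, ?_⟩
    · rw [List.mem_range'_1]; omega
    · unfold candF; rw [if_pos ⟨h2, h3⟩]
  rw [hnil] at this
  exact absurd this (List.not_mem_nil)

-- ===== VERDICT (by name: the statement is the Claim_ definition above) =====
theorem solution_spec : Claim_equal_solution := by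
  intro data _ hpre
  unfold Spec_solution solution
  rw [solution_alt_eq]
  have hcne := candList_ne_nil hpre
  obtain ⟨m, hm⟩ : ∃ m, (candList data).max? = some m := by
    cases h : (candList data).max? with
    | none => exact absurd (List.max?_eq_none_iff.mp h) hcne
    | some m => exact ⟨m, rfl⟩
  rw [List.max?_eq_some_iff] at hm
  obtain ⟨hmmem, hmub⟩ := hm
  have hmp : m ∈ pitsA data := candList_subset hmmem
  obtain ⟨m', hm'⟩ : ∃ m', (pitsA data).max? = some m' := by
    cases h : (pitsA data).max? with
    | none =>
      have := List.max?_eq_none_iff.mp h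
      rw [this] at hmp
      exact absurd hmp (List.not_mem_nil)
    | some m' => exact ⟨m', rfl⟩
  rw [List.max?_eq_some_iff] at hm'
  obtain ⟨hm'mem, hm'ub⟩ := hm'
  obtain ⟨y, hy, hm'y⟩ := pitsA_dominated hm'mem
  have h1 : m' ≤ m := le_trans hm'y (hmub y hy)
  have h2 : m ≤ m' := hm'ub m hmp
  have : m' = m := le_antisymm h1 h2
  rw [List.max?_eq_some_iff.mpr ⟨hm'mem, hm'ub⟩,
      List.max?_eq_some_iff.mpr ⟨hmmem, hmub⟩, this]
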